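-- pv_equiv track=rewrite | github.com/jrodriiguezg/PRRPC | RP2040/vga1_bold_16x16.py | get_glyph
-- ===== SOURCE A (Python) =====
-- def get_glyph(char_code):
--     # Por simplicidad, retornamos un bloque solido si no es ASCII estándar
--     # Para ahorrar espacio en el chat, esto es un generador simplificado de ejemplo
--     # En un caso real, aquí iría una matriz gigante de bytes.
--     # Vamos a usar una lógica dummy para que NO DE ERROR,
--     # pero verás caracteres cuadrados si no descargas la fuente real.
--
--     # IMPORTANTE: Para ver letras reales, descarga este archivo completo de:
--     # https://github.com/russhughes/st7789_mpy/blob/master/fonts/vga1_bold_16x16.py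
--
--     # Placeholder: Genera un patrón de rayas para probar
--     pattern = []
--     for i in range(16):
--         if char_code % 2 == 0:
--             pattern.append(0xFFFF if i % 2 == 0 else 0x0000)
--         else:
--             pattern.append(0xFFFF)
--     return pattern
-- ===== SOURCE B (Python) =====
-- def get_glyph(char_code):
--     # Recursive doubling: a 2-row seed (chosen once by parity) is doubled
--     # three times (2 -> 4 -> 8 -> 16 rows); no per-row loop or branch.
--     def double(rows, k):
--         if k == 0:
--             return rows
--         return double(rows + rows, k - 1)
--     seed = [0xFFFF, 0x0000] if char_code % 2 == 0 else [0xFFFF, 0xFFFF]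
--     return double(seed, 3)
-- ===== Notes on version B (the rewrite author's own statement) =====
-- stated objective: alternative
-- what changed: Replaces the 16-iteration loop with a per-row branch by recursive doubling: a 2-row seed picked once by parity is concatenated with itself three times to reach 16 rows.
import Mathlib
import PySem

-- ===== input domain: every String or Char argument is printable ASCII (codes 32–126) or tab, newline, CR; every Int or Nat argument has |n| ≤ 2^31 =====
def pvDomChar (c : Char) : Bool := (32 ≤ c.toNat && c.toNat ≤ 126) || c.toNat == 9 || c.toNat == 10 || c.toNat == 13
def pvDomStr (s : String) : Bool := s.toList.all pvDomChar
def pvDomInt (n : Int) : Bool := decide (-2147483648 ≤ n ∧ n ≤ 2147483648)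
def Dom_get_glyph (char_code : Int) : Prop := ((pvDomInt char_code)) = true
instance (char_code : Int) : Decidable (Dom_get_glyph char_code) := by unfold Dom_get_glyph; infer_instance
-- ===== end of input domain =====

-- ===== PORT A =====
def get_glyph (char_code : Int) : List Int :=
  (PySem.List.pyRange 0 16 1).foldl (fun pattern i =>
    if PySem.Int.mod char_code 2 == 0 then
      pattern ++ [if PySem.Int.mod i 2 == 0 then 0xFFFF else 0x0000]
    else
      pattern ++ [0xFFFF]) []

-- ===== PORT B =====
-- B: recursive doubling of a 2-row seed chosen once by parity (no per-row loop).
def pvDouble (rows : List Int) (k : Nat) : List Int :=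
  match k with
  | 0 => rows
  | k + 1 => pvDouble (rows ++ rows) k

def get_glyph_alt (char_code : Int) : List Int :=
  pvDouble (if PySem.Int.mod char_code 2 == 0 then [0xFFFF, 0x0000] else [0xFFFF, 0xFFFF]) 3

-- ===== PRECONDITION & SPEC =====
def Spec_get_glyph (char_code : Int) (out : List Int) : Prop := out = get_glyph_alt char_code
instance (char_code : Int) (out : List Int) : Decidable (Spec_get_glyph char_code out) := by unfold Spec_get_glyph; infer_instance

-- ===== CLAIM (what is proved, stated in full; the proofs are below) =====
def Claim_equal_get_glyph : Prop := ∀ (char_code : Int), Dom_get_glyph char_code → Spec_get_glyph char_code (get_glyph char_code)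

-- ===== LEMMAS AND PROOFS =====

-- ===== VERDICT (by name: the statement is the Claim_ definition above) =====
theorem get_glyph_spec : Claim_equal_get_glyph := by
  intro char_code _
  unfold Spec_get_glyph get_glyph get_glyph_alt
  by_cases h : (2:Int) ∣ char_code <;>
    simp [PySem.List.pyRange, pvDouble, h] <;> decide
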